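-- pv_equiv track=rewrite | github.com/RJalol/BiLSTM-CRF_uz | data_utils.py | bio_format
-- ===== SOURCE A (Python) =====
-- def bio_format(text, aspect_terms):
--     tokens = text.split()  # oddiy tokenizatsiya
--     labels = ['O'] * len(tokens)
--
--     for term in aspect_terms:
--         term_tokens = term.split()
--         for i in range(len(tokens) - len(term_tokens) + 1):
--             if tokens[i:i+len(term_tokens)] == term_tokens:
--                 labels[i] = 'B-ASP'
--                 for j in range(1, len(term_tokens)):
--                     labels[i+j] = 'I-ASP'
--                 break
--     return tokens, labels
-- ===== SOURCE B (Python) =====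
-- def _is_prefix(pat, toks):
--     # recursive token-wise prefix check
--     if not pat:
--         return True
--     if not toks:
--         return False
--     return pat[0] == toks[0] and _is_prefix(pat[1:], toks[1:])
--
--
-- def _first_prefix_index(tokens, tt):
--     # first i such that tt is a token-prefix of tokens[i:], walking the suffixes
--     i = 0
--     suffix = tokens
--     while True:
--         if _is_prefix(tt, suffix):
--             return i
--         if not suffix:
--             return None
--         suffix = suffix[1:]
--         i += 1
--
--
-- def _label_at(rev_matches, k):
--     # last-applied patch covering k wins: B-ASP at a start, I-ASP inside a span
--     for s, m in rev_matches:
--         if k == s: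
--             return 'B-ASP'
--         if s < k < s + m:
--             return 'I-ASP'
--     return 'O'
--
--
-- def bio_format(text, aspect_terms):
--     tokens = text.split()
--     matches = []
--     for term in aspect_terms:
--         tt = term.split()
--         s = _first_prefix_index(tokens, tt)
--         if s is not None:
--             matches.append((s, len(tt)))
--     rev = matches[::-1]
--     labels = [_label_at(rev, k) for k in range(len(tokens))]
--     return tokens, labels
-- ===== Notes on version B (the rewrite author's own statement) =====
-- stated objective: alternative
-- what changed: Instead of mutating a label array patch-by-patch per term, B first collects each term's first match as a (start, length) span and then decides every position's label in one comprehension by scanning the spans in reverse application order (last patch covering a position wins); matching walks suffixes with a recursive token-prefix check instead of comparing slices over an index range.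
import Mathlib
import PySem

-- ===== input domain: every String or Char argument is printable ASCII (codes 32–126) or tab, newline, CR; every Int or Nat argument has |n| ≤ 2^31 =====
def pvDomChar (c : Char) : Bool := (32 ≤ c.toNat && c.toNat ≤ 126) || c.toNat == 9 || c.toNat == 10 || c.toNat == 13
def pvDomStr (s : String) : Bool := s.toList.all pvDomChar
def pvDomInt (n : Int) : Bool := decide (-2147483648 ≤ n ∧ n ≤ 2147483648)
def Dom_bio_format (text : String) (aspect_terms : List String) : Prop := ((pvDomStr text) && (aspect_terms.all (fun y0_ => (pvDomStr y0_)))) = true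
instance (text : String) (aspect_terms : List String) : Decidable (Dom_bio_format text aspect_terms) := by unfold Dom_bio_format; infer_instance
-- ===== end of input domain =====

-- B re-labels per position from collected (start,length) spans scanned in reverse application
-- order, instead of A's in-place patching of a label array; alternative structure, similar cost.

-- ===== PORT A =====
-- one term of A's outer loop: scan start indices, tag first slice match, break
def bio_step (tokens : List String) (labels : List String) (term : String) : List String :=
  -- term_tokens = term.split(), written inline; range(len(tokens) - len(tt) + 1): Python's
  -- empty range for a negative bound = the Nat-clamped bound here
  match (List.range (tokens.length + 1 - (PySem.Str.split₀ term).length)).find?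
      (fun (i : Nat) => PySem.List.slice tokens (some (i : Int)) (some ((i : Int) + ((PySem.Str.split₀ term).length : Int))) == PySem.Str.split₀ term) with
  | none => labels
  | some i =>
      -- labels[i] = 'B-ASP'; for j in range(1, len(tt)): labels[i+j] = 'I-ASP'
      (List.range' 1 ((PySem.Str.split₀ term).length - 1)).foldl (fun ls j => ls.set (i + j) "I-ASP") (labels.set i "B-ASP")

def bio_format (text : String) (aspect_terms : List String) : List String × List String :=
  let tokens := PySem.Str.split₀ text
  (tokens, aspect_terms.foldl (bio_step tokens) (List.replicate tokens.length "O"))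

-- ===== PORT B =====
-- recursive token-wise prefix check (_is_prefix)
def isPrefixTok : List String → List String → Bool
  | [], _ => true
  | _ :: _, [] => false
  | p :: ps, t :: ts => p == t && isPrefixTok ps ts

-- first i with tt a token-prefix of tokens[i:], walking suffixes (_first_prefix_index)
def firstPrefixIdx : List String → List String → Option Nat
  | toks, tt =>
    if isPrefixTok tt toks then some 0
    else
      match toks with
      | [] => none
      | _ :: rest => (firstPrefixIdx rest tt).map (· + 1)

-- scan spans in reverse application order; first covering span decides (_label_at)
def labelAt : List (Nat × Nat) → Nat → String
  | [], _ => "O"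
  | (s, m) :: ps, k =>
      if k = s then "B-ASP" else if s < k ∧ k < s + m then "I-ASP" else labelAt ps k

def bio_format_alt (text : String) (aspect_terms : List String) : List String × List String :=
  let tokens := PySem.Str.split₀ text
  let spans := aspect_terms.foldl (fun acc term =>
      let tt := PySem.Str.split₀ term
      match firstPrefixIdx tokens tt with
      | some s => acc ++ [(s, tt.length)]
      | none => acc) []
  let rev := spans.reverse      -- matches[::-1]
  (tokens, (List.range tokens.length).map (fun k => labelAt rev k))

-- ===== PRECONDITION & SPEC =====
-- Pre_ excludes exactly the inputs where A raises IndexError: no tokens at all together with a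
-- whitespace-only aspect term (labels[0] = 'B-ASP' on an empty labels list).
def Pre_bio_format (text : String) (aspect_terms : List String) : Prop :=
  ¬ (PySem.Str.split₀ text = [] ∧ ∃ t ∈ aspect_terms, PySem.Str.split₀ t = [])
instance (text : String) (aspect_terms : List String) : Decidable (Pre_bio_format text aspect_terms) := by unfold Pre_bio_format; infer_instance

def pvWitness_bio_format : String × List String := ("the food was great", ["food", "was great"])

def Spec_bio_format (text : String) (aspect_terms : List String) (out : List String × List String) : Prop := out = bio_format_alt text aspect_terms
instance (text : String) (aspect_terms : List String) (out : List String × List String) : Decidable (Spec_bio_format text aspect_terms out) := by unfold Spec_bio_format; infer_instance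

-- ===== CLAIM (what is proved, stated in full; the proofs are below) =====
def Claim_equal_bio_format : Prop := ∀ (text : String) (aspect_terms : List String), Dom_bio_format text aspect_terms → Pre_bio_format text aspect_terms → Spec_bio_format text aspect_terms (bio_format text aspect_terms)
-- ===== LEMMAS AND PROOFS =====

-- isPrefixTok is the prefix relation
theorem isPrefixTok_eq (tt toks : List String) : isPrefixTok tt toks = decide (tt <+: toks) := by
  induction tt generalizing toks with
  | nil => simp [isPrefixTok]
  | cons p ps ih =>
    cases toks with
    | nil => simp [isPrefixTok]
    | cons t ts => by_cases hpt : p = t <;> simp [isPrefixTok, ih, List.cons_prefix_cons, hpt]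

-- A's slice test at i is the prefix test on the i-th suffix
theorem sliceTest_eq (tokens tt : List String) (i : Nat) :
    (PySem.List.slice tokens (some (i : Int)) (some ((i : Int) + (tt.length : Int))) == tt)
      = decide (tt <+: tokens.drop i) := by
  rw [PySem.List.slice_natCast_add]
  rcases Decidable.em (tt <+: tokens.drop i) with h | h
  · simp [h, List.prefix_iff_eq_take.mp h |>.symm]
  · simp [h]
    intro he
    exact absurd (he ▸ List.take_prefix tt.length (tokens.drop i)) h

-- A's index-range search equals B's suffix walk
theorem find_eq (tokens tt : List String) :
    (List.range (tokens.length + 1 - tt.length)).find?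
        (fun (i : Nat) => PySem.List.slice tokens (some (i : Int)) (some ((i : Int) + (tt.length : Int))) == tt)
      = firstPrefixIdx tokens tt := by
  simp only [sliceTest_eq]
  induction tokens with
  | nil =>
    rw [firstPrefixIdx]
    cases tt with
    | nil => simp [isPrefixTok]
    | cons p ps => simp [isPrefixTok]
  | cons t rest ih =>
    rw [firstPrefixIdx, isPrefixTok_eq]
    by_cases hpre : tt <+: (t :: rest)
    · have hlen : tt.length ≤ rest.length + 1 := by simpa using hpre.length_le
      have hr : rest.length + 1 + 1 - tt.length = (rest.length + 1 - tt.length) + 1 := by omega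
      rw [List.length_cons, hr, List.range_succ_eq_map, List.find?_cons]
      simp [hpre]
    · by_cases hlen : tt.length ≤ rest.length + 1
      · have hr : rest.length + 1 + 1 - tt.length = (rest.length + 1 - tt.length) + 1 := by omega
        rw [List.length_cons, hr, List.range_succ_eq_map, List.find?_cons]
        simp only [List.drop_zero, hpre, decide_false]
        rw [List.find?_map]
        have hcomp : ((fun i => decide (tt <+: List.drop i (t :: rest))) ∘ Nat.succ)
            = (fun i => decide (tt <+: List.drop i rest)) := by
          funext i; simp [Function.comp, List.drop_succ_cons]
        rw [hcomp, ih]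
        cases firstPrefixIdx rest tt <;> simp
      · have h1 : rest.length + 1 + 1 - tt.length = 0 := by omega
        have h2 : rest.length + 1 - tt.length = 0 := by omega
        rw [h2] at ih
        rw [List.length_cons, h1]
        simp only [List.range_zero, List.find?_nil] at ih ⊢
        simp [hpre, ← ih]

-- the span list B collects, as a flatMap
def spanOf (tokens : List String) (term : String) : List (Nat × Nat) :=
  match firstPrefixIdx tokens (PySem.Str.split₀ term) with
  | some s => [(s, (PySem.Str.split₀ term).length)]
  | none => []

theorem matches_eq_flatMap (tokens : List String) (terms : List String) (acc : List (Nat × Nat)) :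
    terms.foldl (fun acc term =>
      match firstPrefixIdx tokens (PySem.Str.split₀ term) with
      | some s => acc ++ [(s, (PySem.Str.split₀ term).length)]
      | none => acc) acc = acc ++ terms.flatMap (spanOf tokens) := by
  induction terms generalizing acc with
  | nil => simp
  | cons t ts ih =>
    simp only [List.foldl_cons, List.flatMap_cons, ih, spanOf]
    cases firstPrefixIdx tokens (PySem.Str.split₀ t) <;> simp

-- labelAt with an explicit default, to compose scans
def scanD : List (Nat × Nat) → Nat → String → String
  | [], _, d => d
  | (s, m) :: ps, k, d =>
      if k = s then "B-ASP" else if s < k ∧ k < s + m then "I-ASP" else scanD ps k d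

theorem labelAt_eq_scanD (ms : List (Nat × Nat)) (k : Nat) : labelAt ms k = scanD ms k "O" := by
  induction ms with
  | nil => rfl
  | cons p ps ih => cases p; simp [labelAt, scanD, ih]

theorem scanD_append (ms ps : List (Nat × Nat)) (k : Nat) (d : String) :
    scanD (ms ++ ps) k d = scanD ms k (scanD ps k d) := by
  induction ms with
  | nil => rfl
  | cons p ms ih => cases p; simp [scanD, ih]

-- element view of the I-ASP writing loop
theorem setfold_getD (s : Nat) (k : Nat) : ∀ (cnt a : Nat) (ls : List String),
    ((List.range' a cnt).foldl (fun l j => l.set (s + j) "I-ASP") ls).getD k "O"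
      = if s + a ≤ k ∧ k < s + a + cnt ∧ k < ls.length then "I-ASP" else ls.getD k "O" := by
  intro cnt
  induction cnt with
  | zero =>
    intro a ls
    simp only [List.range'_zero, List.foldl_nil]
    rw [if_neg (by omega)]
  | succ n ih =>
    intro a ls
    rw [List.range'_succ, List.foldl_cons, ih]
    by_cases h1 : s + (a + 1) ≤ k ∧ k < s + (a + 1) + n ∧ k < (ls.set (s + a) "I-ASP").length
    · rw [if_pos h1, if_pos (by simp only [List.length_set] at h1; omega)]
    · rw [if_neg h1]
      simp only [List.length_set] at h1
      by_cases h2 : s + a = k ∧ k < ls.length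
      · rw [if_pos (by omega)]
        simp [List.getD, h2.1, h2.2]
      · rw [if_neg (by omega)]
        simp only [List.getD, List.getElem?_set]
        by_cases hsa : s + a = k
        · have hnl : ¬ s + a < ls.length := by omega
          rw [if_pos hsa, if_neg hnl, List.getElem?_eq_none (by omega : ls.length ≤ k)]
        · rw [if_neg hsa]

theorem setfold_length (s : Nat) (l : List Nat) (ls : List String) :
    (l.foldl (fun l j => l.set (s + j) "I-ASP") ls).length = ls.length := by
  induction l generalizing ls with
  | nil => rfl
  | cons j js ih => simp [ih]

theorem bio_step_length (tokens : List String) (labels : List String) (term : String) :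
    (bio_step tokens labels term).length = labels.length := by
  unfold bio_step
  rw [find_eq]
  cases firstPrefixIdx tokens (PySem.Str.split₀ term) with
  | none => rfl
  | some i => rw [setfold_length]; simp

-- the per-term effect on one label position
theorem bio_step_getD (tokens : List String) (labels : List String) (term : String) (k : Nat)
    (hk : k < labels.length) :
    (bio_step tokens labels term).getD k "O" = scanD (spanOf tokens term) k (labels.getD k "O") := by
  unfold bio_step spanOf
  rw [find_eq]
  cases hf : firstPrefixIdx tokens (PySem.Str.split₀ term) with
  | none => simp [scanD]
  | some s =>
    simp only [scanD]
    rw [setfold_getD]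
    simp only [List.length_set]
    by_cases h1 : k = s
    · subst h1
      rw [if_neg (by omega), if_pos rfl]
      simp [List.getD, hk]
    · rw [if_neg h1]
      by_cases h2 : s < k ∧ k < s + (PySem.Str.split₀ term).length
      · rw [if_pos (by constructor; omega; constructor; omega; exact hk), if_pos h2]
      · rw [if_neg (by omega), if_neg h2]
        simp [List.getD, Ne.symm h1]

-- main invariant: folding A's steps = B's per-position reverse scan over collected spans
theorem foldl_inv (tokens : List String) (terms : List String) : ∀ (L : List String),
    L.length = tokens.length →
    terms.foldl (bio_step tokens) L
      = (List.range tokens.length).map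
          (fun k => scanD ((terms.flatMap (spanOf tokens)).reverse) k (L.getD k "O")) := by
  induction terms with
  | nil =>
    intro L hL
    simp only [List.foldl_nil, List.flatMap_nil, List.reverse_nil]
    apply List.ext_getElem (by simp [hL])
    intro k h1 h2
    simp [scanD, List.getD, List.getElem?_eq_getElem h1]
  | cons t ts ih =>
    intro L hL
    rw [List.foldl_cons, ih (bio_step tokens L t) (by rw [bio_step_length]; exact hL)]
    apply List.map_congr_left
    intro k hk
    simp only [List.mem_range] at hk
    rw [bio_step_getD tokens L t k (by omega)]
    simp only [List.flatMap_cons, List.reverse_append, scanD_append]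
    congr 1
    cases hs : spanOf tokens t with
    | nil => rfl
    | cons p ps =>
      have hps : ps = [] := by
        unfold spanOf at hs
        split at hs <;> simp_all
      subst hps
      rfl

-- ===== VERDICT (by name: the statement is the Claim_ definition above) =====
theorem bio_format_spec : Claim_equal_bio_format := by
  intro text aspect_terms _ _
  unfold Spec_bio_format bio_format bio_format_alt
  simp only
  rw [matches_eq_flatMap, List.nil_append]
  congr 1
  rw [foldl_inv _ _ _ (by simp)]
  apply List.map_congr_left
  intro k hk
  simp only [List.mem_range] at hk
  rw [labelAt_eq_scanD]
  congr 1
  simp [List.getD, hk]
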